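-- pv_equiv track=rewrite | github.com/canrager/iterated_prefill_crawler | exp/postprocess_topic_summaries.py | validate_clustering_json
-- ===== SOURCE A (Python) =====
-- from typing import List, Dict, Tuple, Optional, Any
--
-- def validate_clustering_json(clustering: Dict[str, Any], batch_size: int) -> bool:
--     """
--     Validate that the clustering JSON has correct structure:
--     - Values are lists of integers
--     - Integers from 1 to batch_size appear exactly once across all lists
--
--     Args:
--         clustering: Parsed JSON clustering dictionary
--         batch_size: Expected number of topics (1-indexed, so max index should be batch_size)
--
--     Returns:
--         True if validation passes, False otherwise
--     """
--     if not isinstance(clustering, dict):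
--         return False
--
--     all_indices = []
--     for cluster_name, indices in clustering.items():
--         if not isinstance(indices, list):
--             return False
--         for idx in indices:
--             if not isinstance(idx, int):
--                 return False
--             all_indices.append(idx)
--
--     # Check that integers 1 to batch_size appear exactly once
--     expected_indices = set(range(1, batch_size + 1))
--     actual_indices = set(all_indices)
--
--     if expected_indices != actual_indices:
--         return False
--
--     # Check for duplicates (shouldn't happen if sets match, but double-check)
--     if len(all_indices) != len(set(all_indices)):
--         return False
--
--     return True
-- ===== SOURCE B (Python) =====
-- def validate_clustering_json(clustering, batch_size):
--     if not isinstance(clustering, dict):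
--         return False
--     seen = set()
--     for indices in clustering.values():
--         if not isinstance(indices, list):
--             return False
--         for idx in indices:
--             if not isinstance(idx, int):
--                 return False
--             if idx < 1 or idx > batch_size or idx in seen:
--                 return False
--             seen.add(idx)
--     return len(seen) == max(batch_size, 0)
-- ===== Notes on version B (the rewrite author's own statement) =====
-- stated objective: faster
-- what changed: Instead of collecting all indices into a list and then comparing its set against set(range(1, batch_size+1)) plus a separate duplicate check, B validates in a single early-exit pass with a seen-set: each index must be in [1, batch_size] and unseen, and at the end |seen| must equal max(batch_size, 0).
import Mathlib
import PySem

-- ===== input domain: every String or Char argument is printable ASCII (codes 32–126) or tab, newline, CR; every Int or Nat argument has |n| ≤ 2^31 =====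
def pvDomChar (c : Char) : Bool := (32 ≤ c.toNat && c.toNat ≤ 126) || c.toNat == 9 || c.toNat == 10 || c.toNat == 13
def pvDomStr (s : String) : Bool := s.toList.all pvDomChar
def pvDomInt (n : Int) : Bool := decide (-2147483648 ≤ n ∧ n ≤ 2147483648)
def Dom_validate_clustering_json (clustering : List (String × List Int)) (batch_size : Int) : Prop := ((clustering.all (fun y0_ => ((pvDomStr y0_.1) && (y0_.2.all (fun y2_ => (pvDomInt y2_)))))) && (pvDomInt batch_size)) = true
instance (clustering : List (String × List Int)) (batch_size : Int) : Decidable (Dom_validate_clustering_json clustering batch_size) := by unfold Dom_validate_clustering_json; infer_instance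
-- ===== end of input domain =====

-- B replaces A's collect-then-compare-sets validation by a single early-exit pass that maintains a
-- seen-set and finally compares its size with max(batch_size, 0), never building set(range(1, batch_size+1)).


-- ===== PORT A =====
-- the isinstance guards of the Python are vacuously true under the type convention
def validate_clustering_json (clustering : List (String × List Int)) (batch_size : Int) : Bool :=
  let all_indices : List Int := clustering.foldl (fun acc p => acc ++ p.2) []
  let expected : PySem.Set Int := PySem.Set.ofList (PySem.List.pyRange 1 (batch_size + 1) 1)
  let actual : PySem.Set Int := PySem.Set.ofList all_indices
  if !(PySem.Set.equal expected actual) then false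
  else if all_indices.length ≠ (PySem.Set.ofList all_indices).length then false
  else true

-- ===== PORT B =====
-- inner loop of B: over one value list, early return False = none
def vcjInner (b : Int) : List Int → PySem.Set Int → Option (PySem.Set Int)
  | [], seen => some seen
  | i :: rest, seen =>
    if i < 1 || b < i || PySem.Set.contains seen i then none
    else vcjInner b rest (PySem.Set.add seen i)

-- outer loop of B: over clustering.values()
def vcjOuter (b : Int) : List (String × List Int) → PySem.Set Int → Option (PySem.Set Int)
  | [], seen => some seen
  | p :: rest, seen =>
    match vcjInner b p.2 seen with
    | none => none
    | some seen' => vcjOuter b rest seen'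

def validate_clustering_json_alt (clustering : List (String × List Int)) (batch_size : Int) : Bool :=
  match vcjOuter batch_size clustering PySem.Set.empty with
  | none => false
  | some seen => ((PySem.Set.len seen : Int) == max batch_size 0)

-- ===== PRECONDITION & SPEC =====
def Spec_validate_clustering_json (clustering : List (String × List Int)) (batch_size : Int) (out : Bool) : Prop := out = validate_clustering_json_alt clustering batch_size
instance (clustering : List (String × List Int)) (batch_size : Int) (out : Bool) : Decidable (Spec_validate_clustering_json clustering batch_size out) := by unfold Spec_validate_clustering_json; infer_instance

-- ===== CLAIM (what is proved, stated in full; the proofs are below) =====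
def Claim_equal_validate_clustering_json : Prop := ∀ (clustering : List (String × List Int)) (batch_size : Int), Dom_validate_clustering_json clustering batch_size → Spec_validate_clustering_json clustering batch_size (validate_clustering_json clustering batch_size)

-- ===== LEMMAS AND PROOFS =====

lemma vcjInner_append (b : Int) (xs ys : List Int) (s : PySem.Set Int) :
    vcjInner b (xs ++ ys) s = (vcjInner b xs s).bind (vcjInner b ys) := by
  induction xs generalizing s with
  | nil => rfl
  | cons i rest ih =>
    simp only [List.cons_append, vcjInner]
    split <;> simp [ih]

lemma vcjOuter_eq_inner_flatMap (b : Int) (l : List (String × List Int)) (s : PySem.Set Int) :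
    vcjOuter b l s = vcjInner b (l.flatMap (·.2)) s := by
  induction l generalizing s with
  | nil => rfl
  | cons p rest ih =>
    simp only [List.flatMap_cons, vcjOuter, vcjInner_append]
    cases vcjInner b p.2 s with
    | none => rfl
    | some s' => simp [ih]

/-- characterisation of the inner pass from a duplicate-free seen-set -/
lemma vcjInner_char (b : Int) (xs : List Int) (s : PySem.Set Int) (hs : s.Nodup) :
    vcjInner b xs s =
      if (∀ x ∈ xs, 1 ≤ x ∧ x ≤ b) ∧ (s ++ xs).Nodup then some (s ++ xs) else none := by
  induction xs generalizing s with
  | nil => simp [vcjInner, hs]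
  | cons i rest ih =>
    simp only [vcjInner]
    by_cases hbad : i < 1 ∨ b < i ∨ i ∈ s
    · have hcond : (i < 1 || b < i || PySem.Set.contains s i) = true := by
        rcases hbad with h | h | h <;> simp [h]
      rw [if_pos hcond]
      have hno : ¬ ((∀ x ∈ i :: rest, 1 ≤ x ∧ x ≤ b) ∧ (s ++ i :: rest).Nodup) := by
        rintro ⟨hall, hnd⟩
        rcases hbad with h | h | h
        · have := hall i (by simp); omega
        · have := hall i (by simp); omega
        · exact (List.nodup_append.mp hnd).2.2 i h i (by simp) rfl
      rw [if_neg hno]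
    · push_neg at hbad
      obtain ⟨h1, h2, h3⟩ := hbad
      have hcond : (i < 1 || b < i || PySem.Set.contains s i) = false := by
        have : PySem.Set.contains s i = false := by
          cases hc : PySem.Set.contains s i
          · rfl
          · exact absurd ((PySem.Set.contains_iff s i).mp hc) h3
        simp only [this, Bool.or_false, Bool.or_eq_false_iff, decide_eq_false_iff_not]
        exact ⟨by omega, by omega⟩
      rw [hcond, if_neg (by simp)]
      have hadd : PySem.Set.add s i = s ++ [i] := PySem.Set.add_of_not_mem h3
      have hnd' : (s ++ [i]).Nodup := by
        refine List.nodup_append.mpr ⟨hs, List.nodup_singleton i, ?_⟩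
        intro a ha c hc
        simp only [List.mem_singleton] at hc
        subst hc
        exact fun h => h3 (h ▸ ha)
      rw [hadd, ih (s ++ [i]) hnd']
      have hperm : (s ++ [i]) ++ rest = s ++ i :: rest := by simp
      by_cases hrest : (∀ x ∈ rest, 1 ≤ x ∧ x ≤ b) ∧ (s ++ i :: rest).Nodup
      · have hall : ∀ x ∈ i :: rest, 1 ≤ x ∧ x ≤ b := by
          intro x hx
          rcases List.mem_cons.mp hx with rfl | hx
          · exact ⟨h1, h2⟩
          · exact hrest.1 x hx
        rw [if_pos (by rw [hperm]; exact hrest), if_pos ⟨hall, hrest.2⟩, hperm]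
      · rw [if_neg (by rw [hperm]; exact hrest),
            if_neg (by rintro ⟨hall, hnd⟩; exact hrest ⟨fun x hx => hall x (by simp [hx]), hnd⟩)]

lemma ofList_sublist (xs : List Int) : List.Sublist (PySem.Set.ofList xs) xs := by
  induction xs with
  | nil => simp [PySem.Set.ofList_nil]
  | cons x xs ih =>
    rw [PySem.Set.ofList_cons]
    refine List.Sublist.cons₂ x (List.Sublist.trans ?_ ih)
    unfold PySem.Set.discard
    exact List.filter_sublist

lemma length_ofList_eq_iff (xs : List Int) : (PySem.Set.ofList xs).length = xs.length ↔ xs.Nodup := by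
  constructor
  · intro h
    have heq := (ofList_sublist xs).eq_of_length h
    rw [← heq]
    exact PySem.Set.nodup_ofList xs
  · intro h
    rw [PySem.Set.ofList_eq_self_of_nodup xs h]

/-- a duplicate-free list inside [1, b] covers all of [1, b] iff it has max b 0 elements -/
lemma cover_iff_length (xs : List Int) (b : Int) (hnd : xs.Nodup)
    (hall : ∀ x ∈ xs, 1 ≤ x ∧ x ≤ b) :
    (∀ x : Int, 1 ≤ x ∧ x ≤ b → x ∈ xs) ↔ (xs.length : Int) = max b 0 := by
  have hsub : xs.toFinset ⊆ Finset.Icc 1 b := by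
    intro x hx
    exact Finset.mem_Icc.mpr (hall x (List.mem_toFinset.mp hx))
  have hcardIcc : (Finset.Icc (1:Int) b).card = b.toNat := by simp [Int.card_Icc]
  have hcardxs : xs.toFinset.card = xs.length := List.toFinset_card_of_nodup hnd
  constructor
  · intro hcov
    have hsup : Finset.Icc (1:Int) b ⊆ xs.toFinset := fun x hx =>
      List.mem_toFinset.mpr (hcov x (Finset.mem_Icc.mp hx))
    have heq : xs.toFinset = Finset.Icc 1 b := Finset.Subset.antisymm hsub hsup
    have hl : xs.length = b.toNat := by rw [← hcardxs, heq, hcardIcc]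
    omega
  · intro hlen
    have hge : (Finset.Icc (1:Int) b).card ≤ xs.toFinset.card := by
      rw [hcardIcc, hcardxs]; omega
    have heq := Finset.eq_of_subset_of_card_le hsub hge
    intro x hx
    exact List.mem_toFinset.mp (by rw [heq]; exact Finset.mem_Icc.mpr hx)

theorem validate_clustering_json_spec : Claim_equal_validate_clustering_json := by
  intro clustering b _
  unfold Spec_validate_clustering_json
  simp only [validate_clustering_json, validate_clustering_json_alt]
  rw [← List.flatMap_eq_foldl, vcjOuter_eq_inner_flatMap,
      vcjInner_char b _ PySem.Set.empty List.nodup_nil]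
  set xs := clustering.flatMap (fun p => p.2) with hxs
  simp only [PySem.Set.empty, List.nil_append]
  by_cases hnd : xs.Nodup
  · by_cases hcov : ∀ x ∈ xs, 1 ≤ x ∧ x ≤ b
    · rw [if_pos (show (∀ x ∈ xs, 1 ≤ x ∧ x ≤ b) ∧ xs.Nodup from ⟨hcov, hnd⟩)]
      have hlen := (length_ofList_eq_iff xs).mpr hnd
      by_cases hc : (xs.length : Int) = max b 0
      · have hfull : ∀ x : Int, 1 ≤ x ∧ x ≤ b → x ∈ xs :=
          (cover_iff_length xs b hnd hcov).mpr hc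
        have hequal : PySem.Set.equal (PySem.Set.ofList (PySem.List.pyRange 1 (b + 1) 1))
            (PySem.Set.ofList xs) = true := by
          rw [PySem.Set.equal_iff]
          intro x
          simp only [PySem.Set.mem_ofList, PySem.List.mem_pyRange_one]
          constructor
          · intro h; exact hfull x ⟨h.1, by omega⟩
          · intro h; have := hcov x h; omega
        simp [hequal, hlen, PySem.Set.len, hc]
      · have hnful : ¬ ∀ x : Int, 1 ≤ x ∧ x ≤ b → x ∈ xs := fun h =>
          hc ((cover_iff_length xs b hnd hcov).mp h)
        push_neg at hnful
        obtain ⟨x, hxr, hxm⟩ := hnful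
        have hequal : PySem.Set.equal (PySem.Set.ofList (PySem.List.pyRange 1 (b + 1) 1))
            (PySem.Set.ofList xs) = false := by
          cases he : PySem.Set.equal (PySem.Set.ofList (PySem.List.pyRange 1 (b + 1) 1))
              (PySem.Set.ofList xs)
          · rfl
          · exfalso
            have := (PySem.Set.equal_iff _ _).mp he x
            simp only [PySem.Set.mem_ofList, PySem.List.mem_pyRange_one] at this
            exact hxm (this.mp ⟨hxr.1, by omega⟩)
        simp [hequal, PySem.Set.len, hc]
    · rw [if_neg (show ¬ ((∀ x ∈ xs, 1 ≤ x ∧ x ≤ b) ∧ xs.Nodup) from fun h => hcov h.1)]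
      push_neg at hcov
      obtain ⟨x, hxm, hxr⟩ := hcov
      have hequal : PySem.Set.equal (PySem.Set.ofList (PySem.List.pyRange 1 (b + 1) 1))
          (PySem.Set.ofList xs) = false := by
        cases he : PySem.Set.equal (PySem.Set.ofList (PySem.List.pyRange 1 (b + 1) 1))
            (PySem.Set.ofList xs)
        · rfl
        · exfalso
          have := (PySem.Set.equal_iff _ _).mp he x
          simp only [PySem.Set.mem_ofList, PySem.List.mem_pyRange_one] at this
          obtain ⟨ha, hb⟩ := this.mpr hxm
          exact absurd (hxr ha) (by omega)
      simp [hequal]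
  · rw [if_neg (show ¬ ((∀ x ∈ xs, 1 ≤ x ∧ x ≤ b) ∧ xs.Nodup) from fun h => hnd h.2)]
    have hlen : (PySem.Set.ofList xs).length ≠ xs.length := fun h =>
      hnd ((length_ofList_eq_iff xs).mp h)
    cases he : PySem.Set.equal (PySem.Set.ofList (PySem.List.pyRange 1 (b + 1) 1))
        (PySem.Set.ofList xs)
    · simp [he]
    · have hne : xs.length ≠ (PySem.Set.ofList xs).length := fun h => hlen h.symm
      simp [he, hne]
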